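-- pv_equiv track=rewrite | github.com/paritoshtripathi935/Venom | Hackathon/magicNumbers.py | magicNumbers
-- ===== SOURCE A (Python) =====
-- def magicNumbers(arr):
--     # Write your code here
--     # choose random number
--
--     arr.sort()
--     # amke arr set
--     arr = list(set(arr))
--     max_sum = 0
--     for i in range(len(arr)):
--         sum = 0
--         for j in range(len(arr)):
--             if arr[j] >= arr[i]:
--                 sum += arr[i]
--             else:
--                 sum += -arr[j]
--         if sum > max_sum:
--             max_sum = sum
--     if max_sum < 106:
--         return max_sum
-- ===== SOURCE B (Python) =====
-- def magicNumbers(arr):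
--     # Sort-unique + running prefix sum: O(n log n) instead of A's O(n^2) pairwise scan.
--     # (Like A, this sorts the caller's list in place.)
--     arr.sort()
--     d = sorted(set(arr))
--     m = len(d)
--     best = 0
--     prefix = 0
--     i = 0
--     for v in d:
--         cur = v * (m - i) - prefix
--         if cur > best:
--             best = cur
--         prefix += v
--         i += 1
--     if best < 106:
--         return best
-- ===== Notes on version B (the rewrite author's own statement) =====
-- stated objective: faster
-- what changed: Replaces A's quadratic double loop over the deduplicated values by sort-unique plus a single pass that maintains a running prefix sum and index, computing each candidate as v*(m-i)-prefix.
import Mathlib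
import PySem

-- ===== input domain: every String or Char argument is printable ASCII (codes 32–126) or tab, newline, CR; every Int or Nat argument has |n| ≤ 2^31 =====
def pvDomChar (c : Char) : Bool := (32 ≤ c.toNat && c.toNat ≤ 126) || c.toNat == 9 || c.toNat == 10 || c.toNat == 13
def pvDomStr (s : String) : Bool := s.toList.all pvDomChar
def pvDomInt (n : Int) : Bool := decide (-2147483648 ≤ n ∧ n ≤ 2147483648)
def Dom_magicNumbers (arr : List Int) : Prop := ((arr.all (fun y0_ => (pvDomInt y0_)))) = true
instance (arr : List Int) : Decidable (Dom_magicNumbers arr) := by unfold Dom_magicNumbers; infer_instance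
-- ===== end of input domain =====

-- B replaces A's O(n^2) pairwise double loop by sort-unique + one prefix-sum pass (asymptotically faster);
-- like A, the Python B sorts the caller's list in place (return value is what is proved equal).


-- ===== PORT A =====
-- 'arr = list(set(arr))' iterates a Python set in an unspecified order; the double loop below is
-- order-independent (max over i of a sum over all j), so porting the set as PySem.Set.ofList is exact.
def magicNumbers (arr : List Int) : Option Int :=
  let a1 := PySem.List.sorted arr (fun x => x) false          -- arr.sort()
  let s : List Int := PySem.Set.ofList a1                     -- arr = list(set(arr))
  let max_sum := s.foldl (fun max_sum ai =>
      let sum := s.foldl (fun sum aj =>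
          if aj ≥ ai then sum + ai else sum + (-aj)) 0
      if sum > max_sum then sum else max_sum) 0
  if max_sum < 106 then some max_sum else none

-- ===== PORT B =====
-- state st = (best, prefix, i)
def magicNumbers_alt (arr : List Int) : Option Int :=
  let d := PySem.List.sorted (PySem.Set.ofList arr) (fun x => x) false   -- d = sorted(set(arr))
  let m : Int := d.length
  let st := d.foldl (fun (st : Int × Int × Int) v =>
      let cur := v * (m - st.2.2) - st.2.1
      (if cur > st.1 then cur else st.1, st.2.1 + v, st.2.2 + 1)) (0, 0, 0)
  if st.1 < 106 then some st.1 else none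

-- ===== PRECONDITION & SPEC =====
def Spec_magicNumbers (arr : List Int) (out : Option Int) : Prop := out = magicNumbers_alt arr
instance (arr : List Int) (out : Option Int) : Decidable (Spec_magicNumbers arr out) := by unfold Spec_magicNumbers; infer_instance

-- ===== CLAIM (what is proved, stated in full; the proofs are below) =====
def Claim_equal_magicNumbers : Prop := ∀ (arr : List Int), Dom_magicNumbers arr → Spec_magicNumbers arr (magicNumbers arr)

-- ===== LEMMAS AND PROOFS =====

-- A's inner loop value for pivot v over list L
def pvInner (L : List Int) (v : Int) : Int :=
  L.foldl (fun sum aj => if aj ≥ v then sum + v else sum + (-aj)) 0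

-- a generic congruence for folds (body agrees on members)
theorem pvFoldl_congr {α β : Type} {f g : β → α → β} (l : List α)
    (h : ∀ acc x, x ∈ l → f acc x = g acc x) (init : β) :
    l.foldl f init = l.foldl g init := by
  induction l generalizing init with
  | nil => rfl
  | cons x t ih =>
    simp only [List.foldl_cons]
    rw [h init x (List.mem_cons_self ..)]
    exact ih (fun acc y hy => h acc y (List.mem_cons_of_mem _ hy)) _

theorem pvFoldl_lt (v : Int) (l : List Int) (h : ∀ x ∈ l, x < v) (c : Int) :
    l.foldl (fun sum aj => if aj ≥ v then sum + v else sum + (-aj)) c = c - l.sum := by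
  induction l generalizing c with
  | nil => simp
  | cons x t ih =>
    have hx : ¬ (x ≥ v) := not_le.mpr (h x (List.mem_cons_self ..))
    simp only [List.foldl_cons, if_neg hx, List.sum_cons]
    rw [ih (fun y hy => h y (List.mem_cons_of_mem _ hy))]
    ring

theorem pvFoldl_ge (v : Int) (l : List Int) (h : ∀ x ∈ l, v ≤ x) (c : Int) :
    l.foldl (fun sum aj => if aj ≥ v then sum + v else sum + (-aj)) c
      = c + (l.length : Int) * v := by
  induction l generalizing c with
  | nil => simp
  | cons x t ih =>
    have hx : x ≥ v := h x (List.mem_cons_self ..)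
    simp only [List.foldl_cons, if_pos hx, List.length_cons]
    rw [ih (fun y hy => h y (List.mem_cons_of_mem _ hy))]
    push_cast
    ring

-- inner-sum closed form on a strictly increasing list split around its pivot
theorem pvInner_formula (u : List Int) (v : Int) (w : List Int)
    (h : (u ++ v :: w).Pairwise (· < ·)) :
    pvInner (u ++ v :: w) v = v * (1 + (w.length : Int)) - u.sum := by
  rcases List.pairwise_append.mp h with ⟨hu, hvw, huv⟩
  unfold pvInner
  rw [List.foldl_append]
  rw [pvFoldl_lt v u (fun x hx => huv x hx v (List.mem_cons_self ..)) 0]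
  rw [pvFoldl_ge v (v :: w) (by
      intro x hx
      rcases List.mem_cons.mp hx with h' | h'
      · exact le_of_eq h'.symm
      · exact le_of_lt (List.rel_of_pairwise_cons hvw h')) (0 - u.sum)]
  simp only [List.length_cons]
  push_cast
  ring

-- B's loop step
def pvStep (m : Int) (st : Int × Int × Int) (v : Int) : Int × Int × Int :=
  let cur := v * (m - st.2.2) - st.2.1
  (if cur > st.1 then cur else st.1, st.2.1 + v, st.2.2 + 1)

-- A's outer loop over the suffix t equals B's loop, given the processed prefix u
theorem pvOuter (L : List Int) (hL : L.Pairwise (· < ·)) :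
    ∀ (t u : List Int) (best : Int), L = u ++ t →
    t.foldl (fun ms ai => if pvInner L ai > ms then pvInner L ai else ms) best
      = (t.foldl (pvStep (L.length : Int)) (best, u.sum, (u.length : Int))).1 := by
  intro t
  induction t with
  | nil => intro u best _; simp
  | cons v t' ih =>
    intro u best hsplit
    have hinner : pvInner L v = v * (1 + (t'.length : Int)) - u.sum := by
      rw [hsplit] at hL ⊢
      exact pvInner_formula u v t' hL
    have hlen : (L.length : Int) = (u.length : Int) + ((t'.length : Int) + 1) := by
      rw [hsplit]
      push_cast [List.length_append, List.length_cons]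
      ring
    have hcur : v * ((L.length : Int) - (u.length : Int)) - u.sum = pvInner L v := by
      rw [hinner, hlen]; ring
    simp only [List.foldl_cons, pvStep, hcur]
    have hrec := ih (u ++ [v]) (if pvInner L v > best then pvInner L v else best)
      (by rw [hsplit, List.append_assoc]; rfl)
    have hsum : (u ++ [v]).sum = u.sum + v := by simp
    have hlen2 : ((u ++ [v]).length : Int) = (u.length : Int) + 1 := by
      simp [List.length_append]
    rw [hsum, hlen2] at hrec
    exact hrec

-- fold of a running max of g is invariant under permutation
theorem pvFoldl_max_perm (g : Int → Int) {l1 l2 : List Int} (h : l1.Perm l2) :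
    ∀ b : Int, l1.foldl (fun ms a => if g a > ms then g a else ms) b
      = l2.foldl (fun ms a => if g a > ms then g a else ms) b := by
  induction h with
  | nil => intro b; rfl
  | cons x _ ih => intro b; simp only [List.foldl_cons]; exact ih _
  | swap x y l => intro b; simp only [List.foldl_cons]; congr 1; split_ifs <;> omega
  | trans _ _ ih1 ih2 => intro b; rw [ih1, ih2]

theorem pvFoldl_sum_map (v : Int) (l : List Int) (c : Int) :
    l.foldl (fun sum aj => if aj ≥ v then sum + v else sum + (-aj)) c
      = c + (l.map (fun aj => if aj ≥ v then v else -aj)).sum := by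
  induction l generalizing c with
  | nil => simp
  | cons x t ih =>
    simp only [List.foldl_cons, List.map_cons, List.sum_cons, ih]
    split_ifs <;> ring

-- the inner sum is invariant under permutation of the summed list
theorem pvInner_perm {l1 l2 : List Int} (h : l1.Perm l2) (v : Int) :
    pvInner l1 v = pvInner l2 v := by
  unfold pvInner
  rw [pvFoldl_sum_map, pvFoldl_sum_map, (h.map _).sum_eq]

-- A's deduplicated list is a permutation of B's sorted deduplicated list
theorem pvPerm (arr : List Int) :
    (PySem.Set.ofList (PySem.List.sorted arr (fun x => x) false) : List Int).Perm
      (PySem.List.sorted (PySem.Set.ofList arr) (fun x => x) false) := by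
  have n1 : (PySem.Set.ofList (PySem.List.sorted arr (fun x => x) false) : List Int).Nodup :=
    PySem.Set.nodup_ofList _
  have n2 : (PySem.List.sorted (PySem.Set.ofList arr) (fun x => x) false).Nodup :=
    ((PySem.List.sorted_perm _ _ _).nodup_iff).mpr (PySem.Set.nodup_ofList _)
  rw [List.perm_ext_iff_of_nodup n1 n2]
  intro a
  rw [PySem.Set.mem_ofList, PySem.List.mem_sorted, PySem.List.mem_sorted, PySem.Set.mem_ofList]

-- ===== VERDICT (by name: the statement is the Claim_ definition above) =====
theorem magicNumbers_spec : Claim_equal_magicNumbers := by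
  intro arr _
  unfold Spec_magicNumbers magicNumbers magicNumbers_alt
  simp only []
  set d := PySem.List.sorted (PySem.Set.ofList arr) (fun x => x) false with hd
  set s : List Int := PySem.Set.ofList (PySem.List.sorted arr (fun x => x) false) with hs
  have hperm : s.Perm d := pvPerm arr
  have hsort : d.Pairwise (· < ·) := PySem.List.sorted_ofList_pairwise_lt arr
  have key : s.foldl (fun max_sum ai =>
      if (s.foldl (fun sum aj => if aj ≥ ai then sum + ai else sum + (-aj)) 0) > max_sum
      then (s.foldl (fun sum aj => if aj ≥ ai then sum + ai else sum + (-aj)) 0)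
      else max_sum) 0
      = (d.foldl (pvStep (d.length : Int)) (0, 0, 0)).1 := by
    have e1 : s.foldl (fun max_sum ai =>
        if (s.foldl (fun sum aj => if aj ≥ ai then sum + ai else sum + (-aj)) 0) > max_sum
        then (s.foldl (fun sum aj => if aj ≥ ai then sum + ai else sum + (-aj)) 0)
        else max_sum) 0
        = s.foldl (fun ms ai => if pvInner d ai > ms then pvInner d ai else ms) 0 := by
      apply pvFoldl_congr
      intro acc x _
      have hpi := pvInner_perm hperm x
      unfold pvInner at hpi
      rw [hpi]
      rfl
    rw [e1, pvFoldl_max_perm (pvInner d) hperm 0]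
    have hfin := pvOuter d hsort d [] 0 rfl
    simpa using hfin
  rw [key]
  rfl
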